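-- pv_equiv track=rewrite | github.com/fesiib/starlab-contexts-pipeline | pydantic_models/comparison.py | transform_alignments
-- ===== SOURCE A (Python) =====
-- def transform_alignments(response, vid1, vid2):
--     alignments_1 = []
--     alignments_2 = []
--     for aspect in response:
--         for relation in response[aspect]:
--             for alignment in response[aspect][relation]:
--                 cur_alignment = {
--                     **alignment,
--                     "aspect": aspect,
--                     "relation": relation,
--                 }
--                 del cur_alignment["source_tutorial_id"]
--                 if alignment['source_tutorial_id'] == vid1:
--                     alignments_1.append(cur_alignment)
--                 if alignment['source_tutorial_id'] == vid2:
--                     alignments_2.append(cur_alignment)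
--
--     return alignments_1, alignments_2
-- ===== SOURCE B (Python) =====
-- def transform_alignments(response, vid1, vid2):
--     def select(vid):
--         return [
--             {**{k: v for k, v in alignment.items() if k != "source_tutorial_id"},
--              "aspect": aspect, "relation": relation}
--             for aspect, relations in response.items()
--             for relation, alignments in relations.items()
--             for alignment in alignments
--             if alignment["source_tutorial_id"] == vid
--         ]
--     return select(vid1), select(vid2)
-- ===== Notes on version B (the rewrite author's own statement) =====
-- stated objective: alternative
-- what changed: B is a staged two-pass comprehension: a helper select(vid) flattens the nested dict with one comprehension, filtering by source_tutorial_id and building each merged record by a key-excluding dict comprehension, and is called once per vid; A makes a single triple-nested imperative pass appending into two accumulators via two inline equality tests, and builds records by spread-then-delete.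
import Mathlib
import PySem

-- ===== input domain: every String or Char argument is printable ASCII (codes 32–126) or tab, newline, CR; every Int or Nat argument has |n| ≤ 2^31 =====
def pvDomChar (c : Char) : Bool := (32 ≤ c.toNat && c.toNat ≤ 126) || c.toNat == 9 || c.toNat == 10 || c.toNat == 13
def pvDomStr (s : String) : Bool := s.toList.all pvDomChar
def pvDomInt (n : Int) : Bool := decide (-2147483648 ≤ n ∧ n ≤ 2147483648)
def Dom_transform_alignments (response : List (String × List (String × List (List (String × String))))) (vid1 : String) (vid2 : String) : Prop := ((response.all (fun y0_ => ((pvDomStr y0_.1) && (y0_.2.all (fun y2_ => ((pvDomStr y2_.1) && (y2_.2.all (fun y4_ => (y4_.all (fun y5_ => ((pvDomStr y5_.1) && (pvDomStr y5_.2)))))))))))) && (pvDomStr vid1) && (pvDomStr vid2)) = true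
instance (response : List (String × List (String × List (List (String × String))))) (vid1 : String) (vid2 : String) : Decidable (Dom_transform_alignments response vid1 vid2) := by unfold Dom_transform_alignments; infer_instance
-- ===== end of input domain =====

-- B is a staged two-pass rewrite: a comprehension helper select(vid), run once per vid,
-- replaces A's single triple-nested loop with two inline tests and two accumulators
-- (objective: alternative decomposition, same asymptotic cost).

-- ===== PORT A =====
def transform_alignments (response : List (String × List (String × List (List (String × String))))) (vid1 : String) (vid2 : String) : (List (List (String × String))) × (List (List (String × String))) :=
  (PySem.Dict.ofList response).items.foldl (fun acc ar =>
    (PySem.Dict.ofList ar.2).items.foldl (fun acc ra =>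
      ra.2.foldl (fun acc al =>
        let ad := PySem.Dict.ofList al
        let cur := (((ad.insert "aspect" ar.1).insert "relation" ra.1).erase "source_tutorial_id").items
        match ad.get? "source_tutorial_id" with
        | none => acc  -- Python raises KeyError here; excluded by Pre_
        | some src =>
          (if src == vid1 then acc.1 ++ [cur] else acc.1,
           if src == vid2 then acc.2 ++ [cur] else acc.2)) acc) acc) ([], [])

-- ===== PORT B =====
-- B's helper select(vid): one comprehension over the nested dicts, filtered by
-- source_tutorial_id == vid; the record is a key-excluding dict comprehension
-- merged with the aspect/relation keys.
def pvSelectB (response : List (String × List (String × List (List (String × String))))) (vid : String) : List (List (String × String)) :=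
  (PySem.Dict.ofList response).items.flatMap (fun ar =>
    (PySem.Dict.ofList ar.2).items.flatMap (fun ra =>
      ra.2.filterMap (fun al =>
        let ad := PySem.Dict.ofList al
        match ad.get? "source_tutorial_id" with
        | none => none  -- Python raises KeyError here; excluded by Pre_
        | some src =>
          if src == vid then
            some ((((PySem.Dict.ofList (ad.items.filter (fun p => !(p.1 == "source_tutorial_id")))).insert "aspect" ar.1).insert "relation" ra.1).items)
          else none)))

def transform_alignments_alt (response : List (String × List (String × List (List (String × String))))) (vid1 : String) (vid2 : String) : (List (List (String × String))) × (List (List (String × String))) :=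
  (pvSelectB response vid1, pvSelectB response vid2)

-- ===== PRECONDITION & SPEC =====
-- Pre_ excludes exactly the inputs on which Python A raises KeyError: some visited
-- alignment dict has no "source_tutorial_id" key.
def Pre_transform_alignments (response : List (String × List (String × List (List (String × String))))) (vid1 : String) (vid2 : String) : Prop :=
  ∀ ar ∈ (PySem.Dict.ofList response).items, ∀ ra ∈ (PySem.Dict.ofList ar.2).items, ∀ al ∈ ra.2,
    (PySem.Dict.ofList al).contains "source_tutorial_id" = true
instance (response : List (String × List (String × List (List (String × String))))) (vid1 : String) (vid2 : String) : Decidable (Pre_transform_alignments response vid1 vid2) := by unfold Pre_transform_alignments; infer_instance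

def pvWitness_transform_alignments : (List (String × List (String × List (List (String × String))))) × String × String :=
  ([("cut", [("same", [[("source_tutorial_id", "v1"), ("note", "x")]])])], "v1", "v2")

def Spec_transform_alignments (response : List (String × List (String × List (List (String × String))))) (vid1 : String) (vid2 : String) (out : (List (List (String × String))) × (List (List (String × String)))) : Prop := out = transform_alignments_alt response vid1 vid2
instance (response : List (String × List (String × List (List (String × String))))) (vid1 : String) (vid2 : String) (out : (List (List (String × String))) × (List (List (String × String)))) : Decidable (Spec_transform_alignments response vid1 vid2 out) := by unfold Spec_transform_alignments; infer_instance

-- ===== CLAIM (what is proved, stated in full; the proofs are below) =====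
def Claim_equal_transform_alignments : Prop := ∀ (response : List (String × List (String × List (List (String × String))))) (vid1 : String) (vid2 : String), Dom_transform_alignments response vid1 vid2 → Pre_transform_alignments response vid1 vid2 → Spec_transform_alignments response vid1 vid2 (transform_alignments response vid1 vid2)

-- ===== LEMMAS AND PROOFS =====

-- common reference form: the merged row both programs build for one alignment
def pvCur (a r : String) (al : List (String × String)) : List (String × String) :=
  ((((PySem.Dict.ofList al).erase "source_tutorial_id").insert "aspect" a).insert "relation" r).items

def pvRow (a r : String) (al : List (String × String)) : Option (String × List (String × String)) :=
  ((PySem.Dict.ofList al).get? "source_tutorial_id").map (fun s => (s, pvCur a r al))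

def pvFlat (response : List (String × List (String × List (List (String × String))))) : List (String × List (String × String)) :=
  (PySem.Dict.ofList response).items.flatMap (fun ar =>
    (PySem.Dict.ofList ar.2).items.flatMap (fun ra => ra.2.filterMap (pvRow ar.1 ra.1)))

def pvSel (v : String) (xs : List (String × List (String × String))) : List (List (String × String)) :=
  (xs.filter (fun p => p.1 == v)).map (·.2)

lemma pv_erase_insert {ν : Type} (d : PySem.Dict String ν) (k k' : String) (v : ν) (h : k ≠ k') :
    (d.insert k v).erase k' = (d.erase k').insert k v := by
  apply PySem.Dict.ext
  obtain ⟨l⟩ := d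
  simp only [PySem.Dict.insert, PySem.Dict.erase, PySem.Dict.contains]
  have hk : (k == k') = false := by simpa using h
  have hany : ((List.filter (fun p => !p.1 == k') l).any fun p => p.1 == k) = (l.any fun p => p.1 == k) := by
    induction l with
    | nil => simp
    | cons x xs ih =>
      by_cases hx : x.1 == k'
      · have : (x.1 == k) = false := by
          have := eq_of_beq hx; simp [this, beq_eq_false_iff_ne]; exact fun e => h e.symm
        simp [hx, List.any_cons, this, ih]
      · simp [hx, List.any_cons, ih]
  have hfm : ∀ (xs : List (String × ν)),
      List.filter (fun p => !p.1 == k') (xs.map (fun p => if (p.1 == k) = true then (k, v) else p))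
        = (List.filter (fun p => !p.1 == k') xs).map (fun p => if (p.1 == k) = true then (k, v) else p) := by
    intro xs; induction xs with
    | nil => simp
    | cons x t ih =>
      rw [List.map_cons, List.filter_cons, List.filter_cons]
      simp only [beq_iff_eq] at ih
      by_cases hx : x.1 = k
      · have e1 : (if (x.1 == k) = true then (k, v) else x) = (k, v) := by simp [hx]
        have e2 : (!((k, v) : String × ν).1 == k') = true := by simp [h]
        have e3 : (!x.1 == k') = true := by simp [hx]; exact h
        rw [e1, e2, e3]; simp [ih, hx]
      · have e1 : (if (x.1 == k) = true then (k, v) else x) = x := by simp [hx]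
        rw [e1]
        by_cases hy : x.1 = k'
        · have e3 : (!x.1 == k') = false := by simp [hy]
          rw [e3]; simp [ih]
        · have e3 : (!x.1 == k') = true := by simp [hy]
          rw [e3]; simp [ih, hx]
  by_cases hc : (l.any fun p => p.1 == k)
  · simp only [hany, hc, if_true]
    exact hfm l
  · simp only [hany, hc]
    simp [List.filter_append, hk]

lemma pvCur_eq (a r : String) (al : List (String × String)) :
    ((((PySem.Dict.ofList al).insert "aspect" a).insert "relation" r).erase "source_tutorial_id").items
      = pvCur a r al := by
  rw [pv_erase_insert _ "relation" "source_tutorial_id" r (by decide),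
      pv_erase_insert _ "aspect" "source_tutorial_id" a (by decide)]
  rfl

lemma pvSel_append (v : String) (xs ys : List (String × List (String × String))) :
    pvSel v (xs ++ ys) = pvSel v xs ++ pvSel v ys := by
  simp [pvSel]

-- ===== A-side characterisation =====

lemma pvA_inner (vid1 vid2 a r : String) (aligns : List (List (String × String)))
    (acc : List (List (String × String)) × List (List (String × String))) :
    aligns.foldl (fun acc al =>
        let ad := PySem.Dict.ofList al
        let cur := (((ad.insert "aspect" a).insert "relation" r).erase "source_tutorial_id").items
        match ad.get? "source_tutorial_id" with
        | none => acc
        | some src =>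
          (if src == vid1 then acc.1 ++ [cur] else acc.1,
           if src == vid2 then acc.2 ++ [cur] else acc.2)) acc
      = (acc.1 ++ pvSel vid1 (aligns.filterMap (pvRow a r)),
         acc.2 ++ pvSel vid2 (aligns.filterMap (pvRow a r))) := by
  induction aligns generalizing acc with
  | nil => simp [pvSel]
  | cons al t ih =>
    rw [List.foldl_cons, List.filterMap_cons, ih]
    cases hg : (PySem.Dict.ofList al).get? "source_tutorial_id" with
    | none => simp [pvRow, hg]
    | some src =>
      simp only [pvRow, hg, Option.map_some]
      by_cases h1 : (src == vid1) = true <;> by_cases h2 : (src == vid2) = true <;>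
        simp [pvSel, h1, h2, pvCur_eq]

lemma pvA_mid (vid1 vid2 a : String) (rels : List (String × List (List (String × String))))
    (acc : List (List (String × String)) × List (List (String × String))) :
    rels.foldl (fun acc ra =>
        ra.2.foldl (fun acc al =>
          let ad := PySem.Dict.ofList al
          let cur := (((ad.insert "aspect" a).insert "relation" ra.1).erase "source_tutorial_id").items
          match ad.get? "source_tutorial_id" with
          | none => acc
          | some src =>
            (if src == vid1 then acc.1 ++ [cur] else acc.1,
             if src == vid2 then acc.2 ++ [cur] else acc.2)) acc) acc
      = (acc.1 ++ pvSel vid1 (rels.flatMap (fun ra => ra.2.filterMap (pvRow a ra.1))),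
         acc.2 ++ pvSel vid2 (rels.flatMap (fun ra => ra.2.filterMap (pvRow a ra.1)))) := by
  induction rels generalizing acc with
  | nil => simp [pvSel]
  | cons ra t ih =>
    rw [List.foldl_cons, pvA_inner, ih, List.flatMap_cons, pvSel_append, pvSel_append]
    simp [List.append_assoc]

lemma pvA_outer (vid1 vid2 : String) (rows : List (String × List (String × List (List (String × String)))))
    (acc : List (List (String × String)) × List (List (String × String))) :
    rows.foldl (fun acc ar =>
        (PySem.Dict.ofList ar.2).items.foldl (fun acc ra =>
          ra.2.foldl (fun acc al =>
            let ad := PySem.Dict.ofList al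
            let cur := (((ad.insert "aspect" ar.1).insert "relation" ra.1).erase "source_tutorial_id").items
            match ad.get? "source_tutorial_id" with
            | none => acc
            | some src =>
              (if src == vid1 then acc.1 ++ [cur] else acc.1,
               if src == vid2 then acc.2 ++ [cur] else acc.2)) acc) acc) acc
      = (acc.1 ++ pvSel vid1 (rows.flatMap (fun ar => (PySem.Dict.ofList ar.2).items.flatMap (fun ra => ra.2.filterMap (pvRow ar.1 ra.1)))),
         acc.2 ++ pvSel vid2 (rows.flatMap (fun ar => (PySem.Dict.ofList ar.2).items.flatMap (fun ra => ra.2.filterMap (pvRow ar.1 ra.1))))) := by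
  induction rows generalizing acc with
  | nil => simp [pvSel]
  | cons ar t ih =>
    rw [List.foldl_cons, pvA_mid, ih, List.flatMap_cons, pvSel_append, pvSel_append]
    simp [List.append_assoc]

lemma pvA_eq (response : List (String × List (String × List (List (String × String))))) (vid1 vid2 : String) :
    transform_alignments response vid1 vid2 = (pvSel vid1 (pvFlat response), pvSel vid2 (pvFlat response)) := by
  unfold transform_alignments pvFlat
  rw [pvA_outer]
  simp

-- ===== B-side characterisation =====

lemma pv_ofList_of_nodup {κ ν : Type} [BEq κ] [LawfulBEq κ] (l : List (κ × ν)) (h : (l.map (·.1)).Nodup) :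
    PySem.Dict.ofList l = ⟨l⟩ := by
  apply PySem.Dict.ext
  show (List.foldl (fun acc p => acc.insert p.1 p.2) PySem.Dict.empty l).items = l
  rw [PySem.Dict.items_foldl_insert_fresh (k := Prod.fst) (v := Prod.snd) (d := PySem.Dict.empty) (l := l)
      (fun a _ => PySem.Dict.contains_empty a.1) (by simpa using h)]
  simp [PySem.Dict.empty]

lemma pv_ofList_filter_eq_erase (al : List (String × String)) :
    PySem.Dict.ofList ((PySem.Dict.ofList al).items.filter (fun p => !(p.1 == "source_tutorial_id")))
      = (PySem.Dict.ofList al).erase "source_tutorial_id" := by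
  have hnd : (((PySem.Dict.ofList al).items.filter (fun p => !(p.1 == "source_tutorial_id"))).map (·.1)).Nodup := by
    have h0 : ((PySem.Dict.ofList al).items.map (·.1)).Nodup := PySem.Dict.nodup_keys_ofList al
    exact h0.sublist (List.Sublist.map _ (List.filter_sublist (l := (PySem.Dict.ofList al).items)))
  rw [pv_ofList_of_nodup _ hnd]
  rfl

lemma pvB_inner (vid a r : String) (aligns : List (List (String × String))) :
    aligns.filterMap (fun al =>
        let ad := PySem.Dict.ofList al
        match ad.get? "source_tutorial_id" with
        | none => none
        | some src =>
          if src == vid then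
            some ((((PySem.Dict.ofList (ad.items.filter (fun p => !(p.1 == "source_tutorial_id")))).insert "aspect" a).insert "relation" r).items)
          else none)
      = pvSel vid (aligns.filterMap (pvRow a r)) := by
  induction aligns with
  | nil => rfl
  | cons al t ih =>
    rw [List.filterMap_cons, List.filterMap_cons]
    cases hg : (PySem.Dict.ofList al).get? "source_tutorial_id" with
    | none => simpa [pvRow, hg] using ih
    | some src =>
      rw [ih]
      by_cases h1 : (src == vid) = true
      · simp [pvRow, hg, h1, pvSel, pvCur, pv_ofList_filter_eq_erase]
      · simp [pvRow, hg, h1, pvSel]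

lemma pvSel_flatMap {α : Type} (v : String) (l : List α) (f : α → List (String × List (String × String))) :
    pvSel v (l.flatMap f) = l.flatMap (fun x => pvSel v (f x)) := by
  induction l with
  | nil => rfl
  | cons x t ih => rw [List.flatMap_cons, List.flatMap_cons, pvSel_append, ih]

lemma pvB_select_eq (response : List (String × List (String × List (List (String × String))))) (vid : String) :
    pvSelectB response vid = pvSel vid (pvFlat response) := by
  unfold pvSelectB pvFlat
  rw [pvSel_flatMap]
  refine List.flatMap_congr (fun ar _ => ?_)
  rw [pvSel_flatMap]
  refine List.flatMap_congr (fun ra _ => ?_)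
  exact pvB_inner vid ar.1 ra.1 ra.2

lemma pvB_eq (response : List (String × List (String × List (List (String × String))))) (vid1 vid2 : String) :
    transform_alignments_alt response vid1 vid2 = (pvSel vid1 (pvFlat response), pvSel vid2 (pvFlat response)) := by
  unfold transform_alignments_alt
  rw [pvB_select_eq, pvB_select_eq]

-- ===== VERDICT (by name: the statement is the Claim_ definition above) =====
theorem transform_alignments_spec : Claim_equal_transform_alignments := by
  intro response vid1 vid2 _ _
  unfold Spec_transform_alignments
  rw [pvA_eq, pvB_eq]
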